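-- pv_equiv track=rewrite | github.com/mahela37/adventOfCode | 2022/3/solution.py | run_solution_second
-- ===== SOURCE A (Python) =====
-- def get_char_priority(character: str):
--     if character.isupper():
--         return ord(character) - 38
--     return ord(character) - 96
--
-- def run_solution_second(input: list[str]):
--     sum_priorities = 0
--     i = 0
--
--     while i < len(input):
--         first_rucksack = set(input[i])
--         second_rucksack = set(input[i + 1])
--         third_rucksack = set(input[i + 2])
--         common_items = first_rucksack.intersection(second_rucksack).intersection(
--             third_rucksack
--         )
--
--         for item in common_items:
--             sum_priorities = sum_priorities + get_char_priority(item)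
--
--         i = i + 3  # go to next group of rucksacks
--     return sum_priorities
-- ===== SOURCE B (Python) =====
-- def get_char_priority(character: str):
--     if character.isupper():
--         return ord(character) - 38
--     return ord(character) - 96
--
-- def run_solution_second(input: list[str]):
--     # group consecutive triples with zip over one iterator; per group scan the
--     # fixed ASCII alphabet and test membership in the raw strings (no sets built)
--     total = 0
--     it = iter(input)
--     for a, b, c in zip(it, it, it):
--         for code in range(128):
--             ch = chr(code)
--             if ch in a and ch in b and ch in c:
--                 total = total + get_char_priority(ch)
--     return total
-- ===== Notes on version B (the rewrite author's own statement) =====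
-- stated objective: alternative
-- what changed: Replaces A's per-group set construction and chained set.intersection by structural recursion over the input and a fixed scan of the 128 ASCII codes, testing each character's membership in the three raw strings; no sets are built.
import Mathlib
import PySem

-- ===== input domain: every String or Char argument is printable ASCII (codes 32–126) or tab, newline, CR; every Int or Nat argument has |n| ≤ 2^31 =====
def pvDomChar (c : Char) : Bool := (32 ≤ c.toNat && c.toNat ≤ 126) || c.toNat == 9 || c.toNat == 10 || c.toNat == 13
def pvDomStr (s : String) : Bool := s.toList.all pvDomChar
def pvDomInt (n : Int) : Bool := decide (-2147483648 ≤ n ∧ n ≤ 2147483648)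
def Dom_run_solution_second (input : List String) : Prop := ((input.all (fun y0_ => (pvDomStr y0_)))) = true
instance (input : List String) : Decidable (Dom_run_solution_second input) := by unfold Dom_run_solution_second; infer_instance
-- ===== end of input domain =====

-- B replaces A's per-group set building and chained intersections by a fixed scan over the
-- 128 ASCII codes testing membership in the three raw strings (objective: alternative, not faster).

-- ===== PORT A =====
-- shared module helper: get_char_priority (both Source A and Source B use it on single characters,
-- so it is ported on Char; str.isupper on a one-char ASCII string is 'A' ≤ c ≤ 'Z' = PySem.Chars.isupper)
def get_char_priority (character : Char) : Int :=
  if PySem.Chars.isupper character then (character.toNat : Int) - 38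
  else (character.toNat : Int) - 96

-- A's while-loop over i stepping by 3 transcribed as recursion consuming three lines per step;
-- with 1 or 2 lines left Python raises IndexError (excluded by Pre_), so the fallthrough value is unreachable there.
-- The for-loop over the common set is a sum, which is independent of Python's set iteration order.
def pvLoopA : List String → Int → Int
  | a :: b :: c :: rest, sum_priorities =>
      let first_rucksack := PySem.Set.ofList a.toList
      let second_rucksack := PySem.Set.ofList b.toList
      let third_rucksack := PySem.Set.ofList c.toList
      let common_items := PySem.Set.inter (PySem.Set.inter first_rucksack second_rucksack) third_rucksack
      pvLoopA rest (common_items.foldl (fun s item => s + get_char_priority item) sum_priorities)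
  | _, sum_priorities => sum_priorities

def run_solution_second (input : List String) : Int := pvLoopA input 0

-- ===== PORT B =====
-- 'for a, b, c in zip(it, it, it)' over one iterator yields the consecutive triples (an
-- incomplete trailing group is dropped), transcribed as recursion consuming three lines per
-- step carrying the running total; per group a for-loop over range(128),
-- ch = chr(code) inlined as Char.ofNat code.toNat, 'ch in a' is PySem.Chars.isIn [ch] a.toList
def pvLoopB : List String → Int → Int
  | a :: b :: c :: rest, total =>
      pvLoopB rest ((PySem.List.pyRange 0 128 1).foldl
        (fun total code =>
          if PySem.Chars.isIn [Char.ofNat code.toNat] a.toList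
              && PySem.Chars.isIn [Char.ofNat code.toNat] b.toList
              && PySem.Chars.isIn [Char.ofNat code.toNat] c.toList
          then total + get_char_priority (Char.ofNat code.toNat) else total) total)
  | _, total => total

def run_solution_second_alt (input : List String) : Int := pvLoopB input 0

-- ===== PRECONDITION & SPEC =====
-- A raises IndexError (input[i+1] or input[i+2] past the end) exactly when the number of lines
-- is not a multiple of 3; Pre_ excludes only those inputs.
def Pre_run_solution_second (input : List String) : Prop := input.length % 3 = 0
instance (input : List String) : Decidable (Pre_run_solution_second input) := by
  unfold Pre_run_solution_second; infer_instance
def pvWitness_run_solution_second : List String := ["abc", "bcd", "bde"]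

def Spec_run_solution_second (input : List String) (out : Int) : Prop := out = run_solution_second_alt input
instance (input : List String) (out : Int) : Decidable (Spec_run_solution_second input out) := by
  unfold Spec_run_solution_second; infer_instance

-- ===== CLAIM (what is proved, stated in full; the proofs are below) =====
def Claim_equal_run_solution_second : Prop := ∀ (input : List String), Dom_run_solution_second input → Pre_run_solution_second input → Spec_run_solution_second input (run_solution_second input)

-- ===== LEMMAS AND PROOFS =====

-- proof-only induction skeleton: consume three lines per step (the shared group shape)
def pvTriples : List String → Unit
  | _ :: _ :: _ :: rest => pvTriples rest
  | _ => ()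

-- the list of all 128 ASCII characters in code order (B's scan domain)
def pvAscii : List Char := (PySem.List.pyRange 0 128 1).map (fun code => Char.ofNat code.toNat)

set_option maxRecDepth 4096 in
theorem pvAscii_nodup : pvAscii.Nodup := by decide

theorem pvIsIn_singleton (ch : Char) (l : List Char) :
    PySem.Chars.isIn [ch] l = true ↔ ch ∈ l := by
  rw [PySem.Chars.isIn_iff_infix]
  constructor
  · intro h; exact List.singleton_sublist.mp h.sublist
  · intro h
    obtain ⟨s, t, rfl⟩ := List.append_of_mem h
    exact ⟨s, t, by simp⟩

theorem pvMem_ascii (ch : Char) (h : ch.toNat < 128) : ch ∈ pvAscii := by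
  refine List.mem_map.mpr ⟨(ch.toNat : Int), ?_, ?_⟩
  · exact PySem.List.mem_pyRange_one.mpr ⟨by positivity, by exact_mod_cast h⟩
  · simp [Char.ofNat_toNat]

theorem pvCharLt128 (ch : Char) (h : pvDomChar ch = true) : ch.toNat < 128 := by
  simp only [pvDomChar, Bool.or_eq_true, Bool.and_eq_true, decide_eq_true_eq, beq_iff_eq] at h
  omega

-- a foldl that adds f item is the accumulator plus the sum of the mapped list
theorem pvFoldl_add_prio (L : List Char) :
    ∀ g : Int, L.foldl (fun s item => s + get_char_priority item) g
      = g + (L.map get_char_priority).sum := by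
  induction L with
  | nil => intro g; simp
  | cons x xs ih => intro g; simp only [List.foldl_cons, List.map_cons, List.sum_cons, ih]; ring

-- B's inner loop over integer codes: accumulator plus the sum over the filtered character list
theorem pvFoldl_codes (q : Char → Bool) (L : List Int) :
    ∀ g : Int,
      L.foldl (fun s code =>
        if q (Char.ofNat code.toNat) then s + get_char_priority (Char.ofNat code.toNat) else s) g
      = g + (((L.map (fun code => Char.ofNat code.toNat)).filter q).map get_char_priority).sum := by
  induction L with
  | nil => intro g; simp
  | cons x xs ih =>
    intro g
    by_cases h : q (Char.ofNat x.toNat) <;>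
      simp only [List.foldl_cons, List.map_cons, List.filter_cons, h,
        Bool.false_eq_true, if_true, if_false, List.sum_cons, ih] <;> ring

-- per-group: A's intersection list and B's filtered ASCII list are permutations, so the sums agree
theorem pvGroup_eq (a b c : String) (ha : ∀ ch ∈ a.toList, pvDomChar ch = true) :
    (((PySem.Set.inter (PySem.Set.inter (PySem.Set.ofList a.toList) (PySem.Set.ofList b.toList))
        (PySem.Set.ofList c.toList)).map get_char_priority).sum : Int)
    = (((pvAscii.filter (fun ch => PySem.Chars.isIn [ch] a.toList
          && PySem.Chars.isIn [ch] b.toList && PySem.Chars.isIn [ch] c.toList)).map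
            get_char_priority).sum) := by
  apply List.Perm.sum_eq
  apply List.Perm.map
  rw [List.perm_ext_iff_of_nodup
    (PySem.Set.nodup_inter _ _ (PySem.Set.nodup_inter _ _ (PySem.Set.nodup_ofList _)))
    (List.Nodup.filter _ pvAscii_nodup)]
  intro ch
  simp only [PySem.Set.mem_inter, PySem.Set.mem_ofList, List.mem_filter, Bool.and_eq_true,
    pvIsIn_singleton]
  constructor
  · rintro ⟨⟨hA, hB⟩, hC⟩
    exact ⟨pvMem_ascii ch (pvCharLt128 ch (ha ch hA)), ⟨hA, hB⟩, hC⟩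
  · rintro ⟨-, ⟨hA, hB⟩, hC⟩
    exact ⟨⟨hA, hB⟩, hC⟩

theorem pvLoopA_cons (a b c : String) (rest : List String) (g : Int) :
    pvLoopA (a :: b :: c :: rest) g
      = pvLoopA rest ((PySem.Set.inter
            (PySem.Set.inter (PySem.Set.ofList a.toList) (PySem.Set.ofList b.toList))
            (PySem.Set.ofList c.toList)).foldl
          (fun s item => s + get_char_priority item) g) := rfl

theorem pvLoopB_cons (a b c : String) (rest : List String) (g : Int) :
    pvLoopB (a :: b :: c :: rest) g
      = pvLoopB rest ((PySem.List.pyRange 0 128 1).foldl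
          (fun total code =>
            if PySem.Chars.isIn [Char.ofNat code.toNat] a.toList
                && PySem.Chars.isIn [Char.ofNat code.toNat] b.toList
                && PySem.Chars.isIn [Char.ofNat code.toNat] c.toList
            then total + get_char_priority (Char.ofNat code.toNat) else total) g) := rfl

theorem pvLoopA_acc (l : List String) : ∀ g : Int, pvLoopA l g = g + pvLoopA l 0 := by
  induction l using pvTriples.induct with
  | case1 a b c rest ih =>
    intro g
    rw [pvLoopA_cons, pvLoopA_cons, ih, ih, pvFoldl_add_prio, pvFoldl_add_prio]
    conv_rhs => rw [ih]
    ring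
  | case2 x h => cases x with
    | nil =>
      intro g; rw [show pvLoopA [] g = g from rfl, show pvLoopA [] 0 = 0 from rfl]; ring
    | cons y ys => cases ys with
      | nil =>
        intro g; rw [show pvLoopA [y] g = g from rfl, show pvLoopA [y] 0 = 0 from rfl]; ring
      | cons z zs => cases zs with
        | nil =>
          intro g
          rw [show pvLoopA [y, z] g = g from rfl, show pvLoopA [y, z] 0 = 0 from rfl]; ring
        | cons w ws => exact absurd rfl (h y z w ws)

theorem pvLoopB_acc (l : List String) : ∀ g : Int, pvLoopB l g = g + pvLoopB l 0 := by
  induction l using pvTriples.induct with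
  | case1 a b c rest ih =>
    intro g
    rw [pvLoopB_cons, pvLoopB_cons, ih, ih,
      pvFoldl_codes (fun ch => PySem.Chars.isIn [ch] a.toList
        && PySem.Chars.isIn [ch] b.toList && PySem.Chars.isIn [ch] c.toList),
      pvFoldl_codes (fun ch => PySem.Chars.isIn [ch] a.toList
        && PySem.Chars.isIn [ch] b.toList && PySem.Chars.isIn [ch] c.toList)]
    conv_rhs => rw [ih]
    ring
  | case2 x h => cases x with
    | nil =>
      intro g; rw [show pvLoopB [] g = g from rfl, show pvLoopB [] 0 = 0 from rfl]; ring
    | cons y ys => cases ys with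
      | nil =>
        intro g; rw [show pvLoopB [y] g = g from rfl, show pvLoopB [y] 0 = 0 from rfl]; ring
      | cons z zs => cases zs with
        | nil =>
          intro g
          rw [show pvLoopB [y, z] g = g from rfl, show pvLoopB [y, z] 0 = 0 from rfl]; ring
        | cons w ws => exact absurd rfl (h y z w ws)

theorem pvMain : ∀ (input : List String), Dom_run_solution_second input →
    Pre_run_solution_second input → pvLoopA input 0 = run_solution_second_alt input := by
  intro input
  induction input using pvTriples.induct with
  | case1 a b c rest ih =>
    intro hdom hpre
    have hdom' : Dom_run_solution_second rest := by
      simp only [Dom_run_solution_second, List.all_cons, Bool.and_eq_true] at hdom ⊢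
      exact hdom.2.2.2
    have ha : ∀ ch ∈ a.toList, pvDomChar ch = true := by
      simp only [Dom_run_solution_second, List.all_cons, Bool.and_eq_true, pvDomStr,
        List.all_eq_true] at hdom
      exact hdom.1
    have hpre' : Pre_run_solution_second rest := by
      simp only [Pre_run_solution_second, List.length_cons] at hpre ⊢
      omega
    have hrest : pvLoopA rest 0 = pvLoopB rest 0 := ih hdom' hpre'
    show pvLoopA (a :: b :: c :: rest) 0 = pvLoopB (a :: b :: c :: rest) 0
    rw [pvLoopA_cons, pvLoopB_cons, pvLoopA_acc, pvLoopB_acc, pvFoldl_add_prio,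
      pvFoldl_codes (fun ch => PySem.Chars.isIn [ch] a.toList
        && PySem.Chars.isIn [ch] b.toList && PySem.Chars.isIn [ch] c.toList),
      pvGroup_eq a b c ha, hrest]
    rfl
  | case2 x h => cases x with
    | nil => intro _ _; rfl
    | cons y ys => cases ys with
      | nil => intro _ hpre; exact absurd hpre (by simp [Pre_run_solution_second])
      | cons z zs => cases zs with
        | nil => intro _ hpre; exact absurd hpre (by simp [Pre_run_solution_second])
        | cons w ws => exact absurd rfl (h y z w ws)

-- ===== VERDICT (by name: the statement is the Claim_ definition above) =====
theorem run_solution_second_spec : Claim_equal_run_solution_second := by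
  intro input hdom hpre
  unfold Spec_run_solution_second run_solution_second
  exact pvMain input hdom hpre
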